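-- pv_equiv track=rewrite | github.com/AhmedHossamMido/mathbot | mathbot/modules/latex/__init__.py | extract_inline_tex
-- ===== SOURCE A (Python) =====
-- def extract_inline_tex(content):
-- 	parts = iter(content.split('$$'))
-- 	latex = ''
-- 	try:
-- 		while True:
-- 			word = next(parts)
-- 			if word != '':
-- 				latex += word.replace('#', '\\#') \
-- 						     .replace('$', '\\$') \
-- 						     .replace('%', '\\%')
-- 				latex += ' '
-- 			word = next(parts)
-- 			if word != '':
-- 				latex += '$\\displaystyle {}$ '.format(word.strip('`'))
-- 	except StopIteration:
-- 		pass
-- 	return latex.rstrip()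
-- ===== SOURCE B (Python) =====
-- def _flush(out, buf, math):
-- 	if not buf:
-- 		return
-- 	if math:
-- 		out.append('$\\displaystyle {}$ '.format(''.join(buf).strip('`')))
-- 	else:
-- 		out.append(''.join(buf) + ' ')
--
-- def extract_inline_tex(content):
-- 	# single left-to-right character scan: toggle text/math mode on each '$$',
-- 	# escape #, $, % on the fly in text mode, flush a buffered segment at each toggle
-- 	out = []
-- 	buf = []
-- 	math = False
-- 	i = 0
-- 	n = len(content)
-- 	while i < n:
-- 		if content.startswith('$$', i):
-- 			_flush(out, buf, math)
-- 			buf = []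
-- 			math = not math
-- 			i += 2
-- 		else:
-- 			c = content[i]
-- 			if not math and c in ('#', '$', '%'):
-- 				buf.append('\\' + c)
-- 			else:
-- 				buf.append(c)
-- 			i += 1
-- 	_flush(out, buf, math)
-- 	return ''.join(out).rstrip()
-- ===== Notes on version B (the rewrite author's own statement) =====
-- stated objective: alternative
-- what changed: Replaces A's split('$$') plus three whole-string .replace passes consumed two-parts-per-iteration via an iterator and StopIteration with a single character-level scan: a text/math mode flag toggled at each '$$', per-character escaping done on the fly, and segment buffers flushed at each toggle.
import Mathlib
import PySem

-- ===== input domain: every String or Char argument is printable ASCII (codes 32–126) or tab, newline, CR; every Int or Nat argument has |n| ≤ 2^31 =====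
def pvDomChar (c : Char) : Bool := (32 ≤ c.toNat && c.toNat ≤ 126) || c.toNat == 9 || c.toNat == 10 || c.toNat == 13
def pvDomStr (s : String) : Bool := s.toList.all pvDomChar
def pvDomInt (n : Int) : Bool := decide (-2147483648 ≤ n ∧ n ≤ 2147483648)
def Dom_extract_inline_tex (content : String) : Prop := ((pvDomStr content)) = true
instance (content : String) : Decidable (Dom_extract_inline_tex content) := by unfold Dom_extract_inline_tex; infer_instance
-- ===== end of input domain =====

-- B replaces A's split('$$') + three whole-string replace passes + exception-driven paired iteration
-- by a single character-level scan with a text/math mode flag toggled at each '$$' (objective: alternative).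

-- ===== PORT A =====
-- word.replace('#','\#').replace('$','\$').replace('%','\%')
def pvEscA (w : List Char) : List Char :=
  PySem.Chars.replace (PySem.Chars.replace (PySem.Chars.replace w "#".toList "\\#".toList)
    "$".toList "\\$".toList) "%".toList "\\%".toList

-- the while-True loop over iter(content.split('$$')): two next() per iteration; StopIteration ends it
def pvGoA : List (List Char) → List Char → List Char
  | [], acc => acc
  | [w], acc =>
      -- first next() succeeds, body runs, second next() raises StopIteration
      if w ≠ [] then acc ++ pvEscA w ++ [' '] else acc
  | w :: m :: rest, acc =>
      let acc1 := if w ≠ [] then acc ++ pvEscA w ++ [' '] else acc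
      let acc2 := if m ≠ [] then
          acc1 ++ "$\\displaystyle ".toList ++ PySem.Chars.stripChars m "`".toList ++ "$ ".toList
        else acc1
      pvGoA rest acc2

def extract_inline_tex (content : String) : String :=
  String.ofList (PySem.Chars.rstrip (pvGoA (PySem.Chars.splitOn content.toList "$$".toList) []))

-- ===== PORT B =====
-- _flush(out, buf, math)
def pvFlush (math : Bool) (buf : List Char) (out : List (List Char)) : List (List Char) :=
  if buf = [] then out
  else if math then
    out ++ ["$\\displaystyle ".toList ++ PySem.Chars.stripChars buf "`".toList ++ "$ ".toList]
  else out ++ [buf ++ [' ']]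

-- the index-based while loop of Source B, rendered as recursion over the remaining suffix content[i:]
-- (content.startswith('$$', i) = PySem.Chars.startswith on the suffix; c in ('#','$','%') = the disjunction)
def pvGoB : List Char → Bool → List Char → List (List Char) → List (List Char)
  | [], math, buf, out => pvFlush math buf out
  | c :: rest, math, buf, out =>
      if PySem.Chars.startswith (c :: rest) "$$".toList then
        pvGoB rest.tail (!math) [] (pvFlush math buf out)
      else
        pvGoB rest math
          (buf ++ (if !math && (c == '#' || c == '$' || c == '%') then ['\\', c] else [c])) out
  termination_by l => l.length
  decreasing_by all_goals simp [List.length_tail]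

def extract_inline_tex_alt (content : String) : String :=
  String.ofList (PySem.Chars.rstrip
    (PySem.Chars.join [] (pvGoB content.toList false [] [])))

-- ===== PRECONDITION & SPEC =====
def Spec_extract_inline_tex (content : String) (out : String) : Prop := out = extract_inline_tex_alt content
instance (content : String) (out : String) : Decidable (Spec_extract_inline_tex content out) := by unfold Spec_extract_inline_tex; infer_instance

-- ===== CLAIM (what is proved, stated in full; the proofs are below) =====
def Claim_equal_extract_inline_tex : Prop := ∀ (content : String), Dom_extract_inline_tex content → Spec_extract_inline_tex content (extract_inline_tex content)

-- ===== LEMMAS AND PROOFS =====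

-- per-character escape and its string form
def pvEscChar (c : Char) : List Char :=
  if c = '#' ∨ c = '$' ∨ c = '%' then ['\\', c] else [c]

def pvEscL (l : List Char) : List Char := l.flatMap pvEscChar

-- replace with a single-char pattern is a per-char flatMap
theorem pvReplaceGo (a : Char) (new : List Char) :
    ∀ (fuel : Nat) (l acc : List Char), l.length ≤ fuel →
    PySem.Chars.replace.go [a] new fuel l acc
      = acc.reverse ++ l.flatMap (fun c => if c = a then new else [c]) := by
  intro fuel
  induction fuel with
  | zero =>
      intro l acc h
      have hl : l = [] := List.length_eq_zero_iff.mp (Nat.le_zero.mp h)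
      subst hl; simp [PySem.Chars.replace.go]
  | succ n ih =>
      intro l acc h
      cases l with
      | nil => simp [PySem.Chars.replace.go]
      | cons c t =>
          by_cases hc : c = a
          · subst hc
            simp [PySem.Chars.replace.go, List.isPrefixOf, ih t _ (by simpa using h)]
          · have : ([a].isPrefixOf (c :: t)) = false := by
              simp [List.isPrefixOf]; intro hh; exact absurd hh.symm hc
            simp [PySem.Chars.replace.go, this, ih t _ (by simpa using h), hc]

theorem pvReplaceSingle (a : Char) (new : List Char) (l : List Char) :
    PySem.Chars.replace l [a] new = l.flatMap (fun c => if c = a then new else [c]) := by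
  simp [PySem.Chars.replace, pvReplaceGo a new l.length l [] le_rfl]

theorem pvEscA_eq (w : List Char) : pvEscA w = pvEscL w := by
  unfold pvEscA
  have h1 : ("#".toList : List Char) = ['#'] := by decide
  have h2 : ("$".toList : List Char) = ['$'] := by decide
  have h3 : ("%".toList : List Char) = ['%'] := by decide
  rw [h1, h2, h3, pvReplaceSingle, pvReplaceSingle, pvReplaceSingle]
  unfold pvEscL
  induction w with
  | nil => simp
  | cons c t ih =>
      simp only [List.flatMap_cons, List.flatMap_append] at *
      rw [ih]
      congr 1
      by_cases hc1 : c = '#'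
      · subst hc1; simp [pvEscChar]
      · by_cases hc2 : c = '$'
        · subst hc2; simp [pvEscChar]
        · by_cases hc3 : c = '%'
          · subst hc3; simp [pvEscChar, hc1]
          · simp [pvEscChar, hc1, hc2, hc3]

-- the segment list both programs walk: content split at non-overlapping '$$', left to right
def pvHC (p : List Char) : List (List Char) → List (List Char)
  | s :: ss => (p ++ s) :: ss
  | [] => [p]

def pvSegs : List Char → List (List Char)
  | [] => [[]]
  | c :: rest =>
      if ("$$".toList : List Char).isPrefixOf (c :: rest) then [] :: pvSegs rest.tail
      else pvHC [c] (pvSegs rest)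
  termination_by l => l.length
  decreasing_by all_goals simp [List.length_tail]

theorem pvSegs_ne_nil (l : List Char) : pvSegs l ≠ [] := by
  cases l with
  | nil => simp [pvSegs]
  | cons c rest =>
      rw [pvSegs]
      split
      · simp
      · cases h : pvSegs rest <;> simp [pvHC]

theorem pvHC_nil (S : List (List Char)) (h : S ≠ []) : pvHC [] S = S := by
  cases S with
  | nil => exact absurd rfl h
  | cons s ss => simp [pvHC]

theorem pvHC_HC (p q : List Char) (S : List (List Char)) :
    pvHC p (pvHC q S) = pvHC (p ++ q) S := by
  cases S <;> simp [pvHC]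

-- splitOn '$$' computes pvSegs
theorem pvSplitGo : ∀ (fuel : Nat) (l cur : List Char) (acc : List (List Char)),
    l.length < fuel →
    PySem.Chars.splitOn.go "$$".toList fuel l cur acc
      = acc.reverse ++ pvHC cur.reverse (pvSegs l) := by
  intro fuel
  induction fuel with
  | zero => intro l cur acc h; omega
  | succ n ih =>
      intro l cur acc h
      cases l with
      | nil => simp [PySem.Chars.splitOn.go, pvSegs, pvHC]
      | cons c rest =>
          by_cases hp : ("$$".toList : List Char).isPrefixOf (c :: rest)
          · have hd : List.drop ("$$".toList : List Char).length (c :: rest) = rest.tail := by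
              cases rest <;> simp
            rw [PySem.Chars.splitOn.go]
            simp only [hp, if_true, hd]
            rw [ih rest.tail [] (cur.reverse :: acc)
                (by cases rest <;> simp_all <;> omega)]
            rw [pvSegs]
            simp only [hp, if_true, List.reverse_nil]
            rw [pvHC_nil _ (pvSegs_ne_nil _)]
            simp [pvHC]
          · rw [PySem.Chars.splitOn.go]
            simp only [hp]
            rw [if_neg (by simp)]
            rw [ih rest (c :: cur) acc (by simp at h ⊢; omega)]
            rw [pvSegs]
            rw [if_neg hp, pvHC_HC]
            simp
  
theorem pvSplitOn_eq (l : List Char) :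
    PySem.Chars.splitOn l "$$".toList = pvSegs l := by
  rw [PySem.Chars.splitOn, pvSplitGo (l.length + 1) l [] [] (by omega)]
  simp [pvHC_nil _ (pvSegs_ne_nil l)]

-- the chunk stream both programs emit, walking segments with alternating mode
def pvProc (math : Bool) (s : List Char) : List Char := if math then s else pvEscL s

def pvWrap (math : Bool) (s : List Char) : List Char :=
  if math then "$\\displaystyle ".toList ++ PySem.Chars.stripChars s "`".toList ++ "$ ".toList
  else s ++ [' ']

def pvChunks : Bool → List (List Char) → List (List Char)
  | _, [] => []
  | math, s :: ss =>
      (if s = [] then [] else [pvWrap math (pvProc math s)]) ++ pvChunks (!math) ss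

def pvChunksW (math : Bool) (buf : List Char) : List (List Char) → List (List Char)
  | [] => []
  | s :: ss =>
      (if buf ++ pvProc math s = [] then [] else [pvWrap math (buf ++ pvProc math s)]) ++
        pvChunks (!math) ss

theorem pvEscL_eq_nil (s : List Char) : pvEscL s = [] ↔ s = [] := by
  cases s with
  | nil => simp [pvEscL]
  | cons c t =>
      simp only [pvEscL, List.flatMap_cons, List.append_eq_nil_iff]
      constructor
      · rintro ⟨h1, -⟩; exfalso; unfold pvEscChar at h1; split at h1 <;> simp_all
      · intro h; simp at h

theorem pvProc_eq_nil (math : Bool) (s : List Char) : pvProc math s = [] ↔ s = [] := by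
  cases math <;> simp [pvProc, pvEscL_eq_nil]

theorem pvChunksW_nilbuf (math : Bool) (S : List (List Char)) :
    pvChunksW math [] S = pvChunks math S := by
  cases S with
  | nil => rfl
  | cons s ss =>
      simp only [pvChunksW, pvChunks, List.nil_append]
      congr 1
      by_cases h : s = []
      · simp [h, pvProc_eq_nil]
      · rw [if_neg (by rw [pvProc_eq_nil]; exact h), if_neg h]

theorem pvFlush_eq (math : Bool) (buf : List Char) (out : List (List Char)) :
    pvFlush math buf out = out ++ (if buf = [] then [] else [pvWrap math buf]) := by
  unfold pvFlush pvWrap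
  split_ifs <;> simp_all

-- B's scan emits exactly the chunk stream
theorem pvGoB_spec (l : List Char) (math : Bool) (buf : List Char)
    (out : List (List Char)) :
    pvGoB l math buf out = out ++ pvChunksW math buf (pvSegs l) := by
  induction l, math, buf, out using pvGoB.induct with
  | case1 math buf out => simp [pvGoB, pvSegs, pvChunks, pvChunksW, pvProc, pvEscL, pvFlush_eq]
  | case2 c rest math buf out hp ih =>
      rw [pvGoB]
      simp only [PySem.Chars.startswith] at *
      rw [if_pos hp, ih, pvFlush_eq, pvSegs, if_pos hp, pvChunksW_nilbuf]
      have hp0 : pvProc math [] = [] := by cases math <;> simp [pvProc, pvEscL]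
      simp [pvChunksW, hp0]
  | case3 c rest math buf out hp ih =>
      rw [pvGoB]
      simp only [PySem.Chars.startswith] at *
      simp only [dite_eq_ite] at ih
      rw [if_neg hp, ih, pvSegs, if_neg hp]
      congr 1
      rcases hS : pvSegs rest with _ | ⟨s, ss⟩
      · exact absurd hS (pvSegs_ne_nil rest)
      · simp only [pvHC, pvChunksW]
        have he : buf ++ (if !math && (c == '#' || c == '$' || c == '%') then ['\\', c] else [c])
              ++ pvProc math s = buf ++ pvProc math (c :: s) := by
          cases math
          · simp only [pvProc, Bool.not_false, Bool.true_and, Bool.false_eq_true,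
              pvEscL, List.flatMap_cons, pvEscChar, List.append_assoc]
            congr 2
            by_cases h1 : c = '#' <;> by_cases h2 : c = '$' <;> by_cases h3 : c = '%' <;>
              simp_all
          · simp [pvProc]
        simp only [he]
        simp

-- A's paired loop emits the same chunk stream
theorem pvGoA_spec (segs : List (List Char)) (acc : List Char) :
    pvGoA segs acc = acc ++ (pvChunks false segs).flatten := by
  match segs with
  | [] => simp [pvGoA, pvChunks]
  | [w] =>
      by_cases hw : w = [] <;>
        simp [pvGoA, pvChunks, hw, pvWrap, pvProc, pvEscA_eq]
  | w :: m :: rest =>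
      rw [pvGoA, pvGoA_spec rest]
      simp only [pvChunks, Bool.not_false, Bool.not_true, List.flatten_append]
      by_cases hw : w = [] <;> by_cases hm : m = [] <;>
        simp [hw, hm, pvWrap, pvProc, pvEscA_eq]

theorem pvJoinNil (ls : List (List Char)) : PySem.Chars.join [] ls = ls.flatten := by
  match ls with
  | [] => simp [PySem.Chars.join, List.intercalate]
  | [a] => simp [PySem.Chars.join, List.intercalate]
  | a :: b :: r =>
      rw [PySem.Chars.join_cons_cons, pvJoinNil (b :: r)]; simp

-- ===== VERDICT (by name: the statement is the Claim_ definition above) =====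
theorem extract_inline_tex_spec : Claim_equal_extract_inline_tex := by
  intro content _
  unfold Spec_extract_inline_tex extract_inline_tex extract_inline_tex_alt
  rw [pvSplitOn_eq, pvGoA_spec, pvGoB_spec, pvJoinNil]
  simp [pvChunksW_nilbuf]
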